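-- pv_equiv track=rewrite | github.com/opentensor/bittensor | bittensor/_subtensor/subtensor_mock.py | _get_most_recent_storage
-- ===== SOURCE A (Python) =====
-- from typing import Any, Dict, List, Optional, Tuple, TypedDict, Union
--
-- BlockNumber = int
--
-- def _get_most_recent_storage( storage: Dict[BlockNumber, Any], block_number: Optional[int] = None ) -> Any:
--     if block_number is None:
--         items = list(storage.items())
--         items.sort(key=lambda x: x[0], reverse=True)
--         return items[0][1]
--
--     else:
--         while block_number >= 0:
--             if block_number in storage:
--                 return storage[block_number]
--
--             block_number -= 1
--
--         return None
-- ===== SOURCE B (Python) =====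
-- def _get_most_recent_storage(storage, block_number=None):
--     if block_number is None:
--         return storage[max(storage)]
--     candidates = [k for k in storage if 0 <= k <= block_number]
--     return storage[max(candidates)] if candidates else None
-- ===== Notes on version B (the rewrite author's own statement) =====
-- stated objective: alternative
-- what changed: Replaces the sort-descending-then-take-first (None case) and the step-down-one-block membership loop with a single pass over the stored keys: max of the keys, resp. max of the keys in [0, block_number].
import Mathlib
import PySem

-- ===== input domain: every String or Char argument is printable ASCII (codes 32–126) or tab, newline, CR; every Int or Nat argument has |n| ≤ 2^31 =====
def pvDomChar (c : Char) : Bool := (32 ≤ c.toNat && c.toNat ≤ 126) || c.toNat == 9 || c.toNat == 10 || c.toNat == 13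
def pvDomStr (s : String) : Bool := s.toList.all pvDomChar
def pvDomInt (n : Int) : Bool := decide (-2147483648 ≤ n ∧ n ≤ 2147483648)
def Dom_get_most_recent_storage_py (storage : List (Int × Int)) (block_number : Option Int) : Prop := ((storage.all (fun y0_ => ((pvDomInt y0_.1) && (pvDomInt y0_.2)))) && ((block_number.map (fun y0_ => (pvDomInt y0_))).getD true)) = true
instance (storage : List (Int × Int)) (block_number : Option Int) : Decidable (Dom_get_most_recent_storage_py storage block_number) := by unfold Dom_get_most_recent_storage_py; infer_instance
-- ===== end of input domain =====

-- B replaces A's descending sort / count-down-by-one membership loop by one max() pass over the keys.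

-- ===== PORT A =====
-- the 'while block_number >= 0: if block_number in storage: return storage[block_number]; block_number -= 1; return None' loop
def pvALoop (d : PySem.Dict Int Int) (b : Int) : Option Int :=
  if h : 0 ≤ b then
    if d.contains b then d.get? b
    else pvALoop d (b - 1)
  else none
termination_by (b + 1).toNat
decreasing_by omega

def get_most_recent_storage_py (storage : List (Int × Int)) (block_number : Option Int) : Option Int :=
  let d := PySem.Dict.ofList storage
  match block_number with
  | none =>
    let items := PySem.List.sorted d.items (fun x => x.1) true
    (PySem.List.pyGet? items 0).map (fun x => x.2)   -- items[0][1]; pyGet? is none exactly where Python raises IndexError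
  | some b => pvALoop d b

-- ===== PORT B =====
def get_most_recent_storage_py_alt (storage : List (Int × Int)) (block_number : Option Int) : Option Int :=
  let d := PySem.Dict.ofList storage
  match block_number with
  | none =>
    match PySem.List.max? d.keys (fun k => k) with   -- storage[max(storage)]
    | some k => d.get? k
    | none => none
  | some b =>
    let candidates := d.keys.filter (fun k => decide (0 ≤ k) && decide (k ≤ b))
    match PySem.List.max? candidates (fun k => k) with
    | some k => d.get? k
    | none => none

-- ===== PRECONDITION & SPEC =====
-- Pre_ excludes only (empty storage, block_number = None), where A raises IndexError (B raises ValueError).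
def Pre_get_most_recent_storage_py (storage : List (Int × Int)) (block_number : Option Int) : Prop :=
  block_number = none → storage ≠ []
instance (storage : List (Int × Int)) (block_number : Option Int) : Decidable (Pre_get_most_recent_storage_py storage block_number) := by unfold Pre_get_most_recent_storage_py; infer_instance

def pvWitness_get_most_recent_storage_py : (List (Int × Int)) × Option Int := ([(1, 7), (3, 9)], none)

def Spec_get_most_recent_storage_py (storage : List (Int × Int)) (block_number : Option Int) (out : Option Int) : Prop := out = get_most_recent_storage_py_alt storage block_number
instance (storage : List (Int × Int)) (block_number : Option Int) (out : Option Int) : Decidable (Spec_get_most_recent_storage_py storage block_number out) := by unfold Spec_get_most_recent_storage_py; infer_instance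

-- ===== CLAIM (what is proved, stated in full; the proofs are below) =====
def Claim_equal_get_most_recent_storage_py : Prop := ∀ (storage : List (Int × Int)) (block_number : Option Int), Dom_get_most_recent_storage_py storage block_number → Pre_get_most_recent_storage_py storage block_number → Spec_get_most_recent_storage_py storage block_number (get_most_recent_storage_py storage block_number)

-- ===== LEMMAS AND PROOFS =====

-- A's count-down loop equals "value at the max key in [0, b]" (B's some-branch body).
lemma pvALoop_eq_aux (n : Nat) : ∀ (d : PySem.Dict Int Int) (b : Int), (b + 1).toNat ≤ n →
    pvALoop d b =
      match PySem.List.max? (d.keys.filter (fun k => decide (0 ≤ k) && decide (k ≤ b))) (fun k => k) with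
      | some k => d.get? k
      | none => none := by
  induction n with
  | zero =>
    intro d b hb
    have hneg : b < 0 := by omega
    rw [pvALoop]
    simp only [not_le.mpr hneg]
    have hfil : d.keys.filter (fun k => decide (0 ≤ k) && decide (k ≤ b)) = [] := by
      apply List.filter_eq_nil_iff.mpr
      intro k _
      simp only [Bool.and_eq_true, decide_eq_true_eq]
      omega
    rw [hfil]
    rfl
  | succ n ih =>
    intro d b hb
    by_cases hneg : 0 ≤ b
    · rw [pvALoop, dif_pos hneg]
      by_cases hc : d.contains b
      · rw [if_pos hc]
        have hbmem : b ∈ d.keys.filter (fun k => decide (0 ≤ k) && decide (k ≤ b)) := by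
          rw [List.mem_filter]
          refine ⟨(PySem.Dict.contains_iff_mem_keys d b).mp hc, by simp [hneg]⟩
        obtain ⟨m, hm⟩ : ∃ m, PySem.List.max? (d.keys.filter (fun k => decide (0 ≤ k) && decide (k ≤ b))) (fun k => k) = some m := by
          rcases h : PySem.List.max? (d.keys.filter (fun k => decide (0 ≤ k) && decide (k ≤ b))) (fun k => k) with _ | m
          · rw [PySem.List.max?_eq_none_iff] at h
            rw [h] at hbmem; cases hbmem
          · exact ⟨m, rfl⟩
        have hmmem := PySem.List.max?_mem hm
        have hmax := PySem.List.max?_isMax hm b hbmem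
        have hmle : m ≤ b := by
          rw [List.mem_filter] at hmmem
          have := hmmem.2
          simp only [Bool.and_eq_true, decide_eq_true_eq] at this
          exact this.2
        have : m = b := le_antisymm hmle hmax
        rw [hm, this]
      · rw [if_neg hc]
        have hfc : d.keys.filter (fun k => decide (0 ≤ k) && decide (k ≤ b)) =
            d.keys.filter (fun k => decide (0 ≤ k) && decide (k ≤ b - 1)) := by
          apply List.filter_congr
          intro k hk
          have hkb : k ≠ b := by
            intro h; apply hc; exact (PySem.Dict.contains_iff_mem_keys d b).mpr (h ▸ hk)
          have hdec : (decide (k ≤ b) : Bool) = decide (k ≤ b - 1) := by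
            simp only [decide_eq_decide]; omega
          rw [hdec]
        rw [ih d (b - 1) (by omega), hfc]
    · rw [pvALoop, dif_neg hneg]
      have hfil : d.keys.filter (fun k => decide (0 ≤ k) && decide (k ≤ b)) = [] := by
        apply List.filter_eq_nil_iff.mpr
        intro k _
        simp only [Bool.and_eq_true, decide_eq_true_eq]
        omega
      rw [hfil]
      rfl

-- A nonempty pair list builds a dict with nonempty items.
lemma pvFold_size (l : List (Int × Int)) : ∀ d : PySem.Dict Int Int,
    d.size ≤ (List.foldl (fun d p => d.insert p.1 p.2) d l).size := by
  induction l with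
  | nil => intro d; exact le_rfl
  | cons q rest ih =>
    intro d
    refine le_trans ?_ (ih (d.insert q.1 q.2))
    rw [PySem.Dict.size_insert]
    split_ifs <;> omega

lemma pvOfList_items_ne (l : List (Int × Int)) (hl : l ≠ []) : (PySem.Dict.ofList l).items ≠ [] := by
  rcases l with _ | ⟨q, rest⟩
  · exact absurd rfl hl
  · intro hitems
    have h1 : (PySem.Dict.ofList (q :: rest)).size = 0 := by
      show (PySem.Dict.ofList (q :: rest)).items.length = 0
      rw [hitems]; rfl
    have h2 : (PySem.Dict.empty.insert q.1 q.2 : PySem.Dict Int Int).size ≤ (PySem.Dict.ofList (q :: rest)).size := by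
      show _ ≤ (List.foldl (fun d p => d.insert p.1 p.2) (PySem.Dict.empty.insert q.1 q.2) rest).size
      exact pvFold_size rest _
    have h3 : (PySem.Dict.empty.insert q.1 q.2 : PySem.Dict Int Int).size = 1 := by
      rw [PySem.Dict.size_insert]
      simp [PySem.Dict.contains_empty, PySem.Dict.size_empty]
    omega

-- None branch: head of the key-descending sort of the items carries the max key's value.
lemma pvNone_eq (d : PySem.Dict Int Int) (hnd : d.keys.Nodup) (hne : d.items ≠ []) :
    (PySem.List.pyGet? (PySem.List.sorted d.items (fun x => x.1) true) 0).map (fun x => x.2) =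
      match PySem.List.max? d.keys (fun k => k) with
      | some k => d.get? k
      | none => none := by
  rcases hs : PySem.List.sorted d.items (fun x => x.1) true with _ | ⟨p, t⟩
  · exact absurd ((PySem.List.sorted_eq_nil_iff _ _ _).mp hs) hne
  · have hkne : d.keys ≠ [] := by
      simp only [PySem.Dict.keys]
      exact fun h => hne (List.map_eq_nil_iff.mp h)
    obtain ⟨m, hm⟩ : ∃ m, PySem.List.max? d.keys (fun k => k) = some m := by
      rcases h : PySem.List.max? d.keys (fun k => k) with _ | m
      · exact absurd ((PySem.List.max?_eq_none_iff _ _).mp h) hkne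
      · exact ⟨m, rfl⟩
    have hpmem : p ∈ d.items := by
      have : p ∈ PySem.List.sorted d.items (fun x => x.1) true := by
        rw [hs]; exact List.mem_cons_self ..
      exact (PySem.List.mem_sorted _ _ _ _).mp this
    have hpk : p.1 ∈ d.keys := by
      simp only [PySem.Dict.keys]
      exact List.mem_map_of_mem hpmem
    have h1 : p.1 ≤ m := PySem.List.max?_isMax hm p.1 hpk
    have h2 : m ≤ p.1 := by
      have hmk := PySem.List.max?_mem hm
      simp only [PySem.Dict.keys] at hmk
      obtain ⟨y, hy, hym⟩ := List.mem_map.mp hmk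
      exact hym ▸ PySem.List.key_head_sorted_rev_ge d.items (fun x => x.1) hs y hy
    have hg : PySem.List.pyGet? (p :: t) 0 = some p := by
      simp [PySem.List.pyGet?, PySem.List.pyIdx?]
    have hget : d.get? p.1 = some p.2 := PySem.Dict.get?_of_mem_items d (by simpa using hpmem) hnd
    rw [hm, le_antisymm h2 h1, hg]
    simp [hget]

-- ===== VERDICT (by name: the statement is the Claim_ definition above) =====
theorem get_most_recent_storage_py_spec : Claim_equal_get_most_recent_storage_py := by
  intro storage bn _ hpre
  unfold Spec_get_most_recent_storage_py get_most_recent_storage_py get_most_recent_storage_py_alt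
  cases bn with
  | none =>
    exact pvNone_eq _ (PySem.Dict.nodup_keys_ofList storage) (pvOfList_items_ne storage (hpre rfl))
  | some b =>
    exact pvALoop_eq_aux ((b + 1).toNat) _ b le_rfl
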